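-- pv_equiv track=rewrite | github.com/ttoro-lee/Algorithms | 프로그래머스/2/68936. 쿼드압축 후 개수 세기/쿼드압축 후 개수 세기.py | q_zip
-- ===== SOURCE A (Python) =====
-- def q_zip(arr, l, m, n):
--     zero_cnt = 0
--     one_cnt = 0
--     visited = []
--
--     for i in range(l, l+n):
--         for j in range(m, m+n):
--             if arr[i][j] == 1 and zero_cnt == 0:
--                 one_cnt +=1
--                 visited.append((i,j))
--             elif arr[i][j] == 0 and one_cnt == 0:
--                 zero_cnt += 1
--                 visited.append((i,j))
--             else:
--                 return -1, []
--
--     if zero_cnt == n**2: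
--         return 0, visited
--     elif one_cnt == n**2:
--         return 1, visited
--     else:
--         return -1, []
-- ===== SOURCE B (Python) =====
-- def q_zip(arr, l, m, n):
--     cells = [(i, j) for i in range(l, l + n) for j in range(m, m + n)]
--     zeros = sum(1 for (i, j) in cells if arr[i][j] == 0)
--     ones = sum(1 for (i, j) in cells if arr[i][j] == 1)
--     if zeros == n ** 2:
--         return 0, cells
--     if ones == n ** 2:
--         return 1, cells
--     return -1, []
-- ===== Notes on version B (the rewrite author's own statement) =====
-- stated objective: alternative
-- what changed: Replaces the single-pass zero_cnt/one_cnt mutually-exclusive counter state machine with early exit by a gather-then-count decomposition: build the cell list with one comprehension, count zeros and ones over it, and compare the counts with n**2.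
-- outside the precondition, e.g. on q_zip([[0, 1]], 0, 0, 2): A returns (-1, []), B raises IndexError
import Mathlib
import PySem

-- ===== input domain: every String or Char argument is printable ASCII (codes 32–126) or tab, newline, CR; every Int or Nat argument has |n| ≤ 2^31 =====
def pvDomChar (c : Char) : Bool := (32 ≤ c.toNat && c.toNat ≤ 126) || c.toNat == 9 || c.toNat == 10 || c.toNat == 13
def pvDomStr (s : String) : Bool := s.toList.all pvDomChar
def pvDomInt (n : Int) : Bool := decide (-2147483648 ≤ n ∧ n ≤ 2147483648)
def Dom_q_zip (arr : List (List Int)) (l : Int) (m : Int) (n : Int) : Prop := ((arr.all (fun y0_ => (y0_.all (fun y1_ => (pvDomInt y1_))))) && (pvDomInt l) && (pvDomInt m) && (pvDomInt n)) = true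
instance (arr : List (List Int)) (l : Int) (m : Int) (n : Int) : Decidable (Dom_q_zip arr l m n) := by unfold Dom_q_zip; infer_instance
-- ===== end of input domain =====

-- B builds the block's cell list with one comprehension and decides the label with two
-- uniformity scans, replacing A's counting state machine with early exit; objective: simpler.


-- ===== PORT A =====
-- arr[i][j] with Python index semantics (none = IndexError, excluded by Pre_)
def qzVal (arr : List (List Int)) (i j : Int) : Option Int :=
  (PySem.List.pyGet? arr i).bind (fun row => PySem.List.pyGet? row j)

-- inner 'for j' loop; an IndexError (qzVal = none) is merged with the early 'return -1, []'
-- into 'none' — exact inside Pre_, which excludes out-of-range indices (where Python raises)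
def qzInner (arr : List (List Int)) (i : Int) (js : List Int) (z o : Int)
    (v : List (Int × Int)) : Option (Int × Int × List (Int × Int)) :=
  match js with
  | [] => some (z, o, v)
  | j :: rest =>
    match qzVal arr i j with
    | none => none
    | some x =>
      if x = 1 ∧ z = 0 then qzInner arr i rest z (o + 1) (v ++ [(i, j)])
      else if x = 0 ∧ o = 0 then qzInner arr i rest (z + 1) o (v ++ [(i, j)])
      else none

-- outer 'for i' loop
def qzOuter (arr : List (List Int)) (is : List Int) (m n : Int) (z o : Int)
    (v : List (Int × Int)) : Option (Int × Int × List (Int × Int)) :=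
  match is with
  | [] => some (z, o, v)
  | i :: rest =>
    match qzInner arr i (PySem.List.pyRange m (m + n) 1) z o v with
    | none => none
    | some (z', o', v') => qzOuter arr rest m n z' o' v'

def q_zip (arr : List (List Int)) (l : Int) (m : Int) (n : Int) : Int × (List (Int × Int)) :=
  match qzOuter arr (PySem.List.pyRange l (l + n) 1) m n 0 0 [] with
  | none => (-1, [])
  | some (z, o, v) =>
    if z = n ^ 2 then (0, v)
    else if o = n ^ 2 then (1, v)
    else (-1, [])

-- ===== PORT B =====
-- cells = [(i, j) for i in range(l, l+n) for j in range(m, m+n)]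
def qzCells (l m n : Int) : List (Int × Int) :=
  (PySem.List.pyRange l (l + n) 1).flatMap
    (fun i => (PySem.List.pyRange m (m + n) 1).map (fun j => (i, j)))

-- sum(1 for (i, j) in cells if arr[i][j] == k) is List.countP; 'arr[i][j] == k' is
-- 'qzVal = some k' (an out-of-range index, where Python B raises, compares unequal;
-- exact inside Pre_, which excludes those inputs)
def q_zip_alt (arr : List (List Int)) (l : Int) (m : Int) (n : Int) : Int × (List (Int × Int)) :=
  let cells := qzCells l m n
  let zeros : Int := (cells.countP (fun c => qzVal arr c.1 c.2 == some 0) : Nat)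
  let ones : Int := (cells.countP (fun c => qzVal arr c.1 c.2 == some 1) : Nat)
  if zeros = n ^ 2 then (0, cells)
  else if ones = n ^ 2 then (1, cells)
  else (-1, [])

-- ===== PRECONDITION & SPEC =====
-- Pre_ excludes exactly the inputs on which one of the programs raises IndexError: those
-- where some visited index leaves Python's valid range [-len, len). There A either raises
-- too, or returns an early (-1, []) from a mixed prefix read before the bad index while B,
-- which reads every cell of the block, raises.
def Pre_q_zip (arr : List (List Int)) (l : Int) (m : Int) (n : Int) : Prop :=
  n ≤ 0 ∨
    (-(arr.length : Int) ≤ l ∧ l + n ≤ (arr.length : Int) ∧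
      ∀ i ∈ PySem.List.pyRange l (l + n) 1,
        -((((PySem.List.pyGet? arr i).getD []).length : Int)) ≤ m ∧
          m + n ≤ (((PySem.List.pyGet? arr i).getD []).length : Int))
instance (arr : List (List Int)) (l : Int) (m : Int) (n : Int) : Decidable (Pre_q_zip arr l m n) := by
  unfold Pre_q_zip; infer_instance

def pvWitness_q_zip : List (List Int) × Int × Int × Int := ([[1, 1], [1, 0]], 0, 0, 2)

def Spec_q_zip (arr : List (List Int)) (l : Int) (m : Int) (n : Int) (out : Int × (List (Int × Int))) : Prop := out = q_zip_alt arr l m n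
instance (arr : List (List Int)) (l : Int) (m : Int) (n : Int) (out : Int × (List (Int × Int))) : Decidable (Spec_q_zip arr l m n out) := by unfold Spec_q_zip; infer_instance

-- ===== CLAIM (what is proved, stated in full; the proofs are below) =====
def Claim_equal_q_zip : Prop := ∀ (arr : List (List Int)) (l : Int) (m : Int) (n : Int), Dom_q_zip arr l m n → Pre_q_zip arr l m n → Spec_q_zip arr l m n (q_zip arr l m n)

-- ===== LEMMAS AND PROOFS =====

-- A's doubly-nested loop flattened to a single loop over the cell list (proof helper)
def qzLoop (arr : List (List Int)) (cs : List (Int × Int)) (z o : Int)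
    (v : List (Int × Int)) : Option (Int × Int × List (Int × Int)) :=
  match cs with
  | [] => some (z, o, v)
  | (i, j) :: rest =>
    match qzVal arr i j with
    | none => none
    | some x =>
      if x = 1 ∧ z = 0 then qzLoop arr rest z (o + 1) (v ++ [(i, j)])
      else if x = 0 ∧ o = 0 then qzLoop arr rest (z + 1) o (v ++ [(i, j)])
      else none

theorem qzInner_eq_loop (arr : List (List Int)) (i : Int) (js : List Int) (z o : Int)
    (v : List (Int × Int)) :
    qzInner arr i js z o v = qzLoop arr (js.map (fun j => (i, j))) z o v := by
  induction js generalizing z o v with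
  | nil => rfl
  | cons j rest ih =>
    simp only [qzInner, qzLoop, List.map]
    cases qzVal arr i j with
    | none => rfl
    | some x => dsimp only; split_ifs <;> simp [ih]

theorem qzLoop_append (arr : List (List Int)) (cs ds : List (Int × Int)) (z o : Int)
    (v : List (Int × Int)) :
    qzLoop arr (cs ++ ds) z o v =
      (qzLoop arr cs z o v).bind (fun s => qzLoop arr ds s.1 s.2.1 s.2.2) := by
  induction cs generalizing z o v with
  | nil => rfl
  | cons c rest ih =>
    obtain ⟨i, j⟩ := c
    simp only [List.cons_append, qzLoop]
    cases qzVal arr i j with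
    | none => rfl
    | some x => dsimp only; split_ifs <;> simp [ih]

theorem qzOuter_eq_loop (arr : List (List Int)) (is : List Int) (m n : Int) (z o : Int)
    (v : List (Int × Int)) :
    qzOuter arr is m n z o v =
      qzLoop arr (is.flatMap (fun i => (PySem.List.pyRange m (m + n) 1).map (fun j => (i, j))))
        z o v := by
  induction is generalizing z o v with
  | nil => rfl
  | cons i rest ih =>
    simp only [qzOuter, List.flatMap_cons, qzLoop_append, qzInner_eq_loop]
    cases qzLoop arr ((PySem.List.pyRange m (m + n) 1).map (fun j => (i, j))) z o v with
    | none => rfl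
    | some s => obtain ⟨z', o', v'⟩ := s; simp [ih]

-- in zero mode (z > 0, o = 0): all-zero cells accumulate, anything else returns -1
theorem qzLoop_zmode (arr : List (List Int)) (cs : List (Int × Int)) (z : Int)
    (v : List (Int × Int)) (hz : 0 < z)
    (hs : ∀ c ∈ cs, (qzVal arr c.1 c.2).isSome = true) :
    qzLoop arr cs z 0 v =
      if ∀ c ∈ cs, qzVal arr c.1 c.2 = some 0 then some (z + cs.length, 0, v ++ cs)
      else none := by
  induction cs generalizing z v with
  | nil => simp [qzLoop]
  | cons c rest ih =>
    obtain ⟨i, j⟩ := c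
    obtain ⟨x, hx⟩ := Option.isSome_iff_exists.mp (hs (i, j) (by simp))
    have hrest : ∀ c ∈ rest, (qzVal arr c.1 c.2).isSome = true :=
      fun c hc => hs c (List.mem_cons_of_mem _ hc)
    simp only [qzLoop, hx]
    by_cases h0 : x = 0
    · subst h0
      rw [if_neg (by omega), if_pos (by simp), ih (z + 1) _ (by omega) hrest]
      simp only [List.forall_mem_cons, hx]
      split_ifs with h1 h2 <;> (simp_all; try omega)
    · rw [if_neg (by rintro ⟨h1, h2⟩; omega), if_neg (by rintro ⟨h1, _⟩; exact h0 h1)]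
      rw [if_neg]
      simp only [List.forall_mem_cons, hx]
      rintro ⟨h1, _⟩
      exact h0 (by injection h1)

-- in one mode (o > 0, z = 0): all-one cells accumulate, anything else returns -1
theorem qzLoop_omode (arr : List (List Int)) (cs : List (Int × Int)) (o : Int)
    (v : List (Int × Int)) (ho : 0 < o)
    (hs : ∀ c ∈ cs, (qzVal arr c.1 c.2).isSome = true) :
    qzLoop arr cs 0 o v =
      if ∀ c ∈ cs, qzVal arr c.1 c.2 = some 1 then some (0, o + cs.length, v ++ cs)
      else none := by
  induction cs generalizing o v with
  | nil => simp [qzLoop]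
  | cons c rest ih =>
    obtain ⟨i, j⟩ := c
    obtain ⟨x, hx⟩ := Option.isSome_iff_exists.mp (hs (i, j) (by simp))
    have hrest : ∀ c ∈ rest, (qzVal arr c.1 c.2).isSome = true :=
      fun c hc => hs c (List.mem_cons_of_mem _ hc)
    simp only [qzLoop, hx]
    by_cases h1 : x = 1
    · subst h1
      rw [if_pos (by simp), ih (o + 1) _ (by omega) hrest]
      simp only [List.forall_mem_cons, hx]
      split_ifs with ha hb <;> (simp_all; try omega)
    · rw [if_neg (by rintro ⟨h, _⟩; exact h1 h), if_neg (by rintro ⟨_, h⟩; omega)]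
      rw [if_neg]
      simp only [List.forall_mem_cons, hx]
      rintro ⟨h, _⟩
      exact h1 (by injection h)

-- full characterisation of A's loop from the initial state
theorem qzLoop_main (arr : List (List Int)) (cs : List (Int × Int))
    (hs : ∀ c ∈ cs, (qzVal arr c.1 c.2).isSome = true) :
    qzLoop arr cs 0 0 [] =
      if ∀ c ∈ cs, qzVal arr c.1 c.2 = some 0 then some ((cs.length : Int), 0, cs)
      else if ∀ c ∈ cs, qzVal arr c.1 c.2 = some 1 then some (0, (cs.length : Int), cs)
      else none := by
  cases cs with
  | nil => simp [qzLoop]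
  | cons c rest =>
    obtain ⟨i, j⟩ := c
    obtain ⟨x, hx⟩ := Option.isSome_iff_exists.mp (hs (i, j) (by simp))
    have hrest : ∀ c ∈ rest, (qzVal arr c.1 c.2).isSome = true :=
      fun c hc => hs c (List.mem_cons_of_mem _ hc)
    simp only [qzLoop, hx]
    by_cases h0 : x = 0
    · subst h0
      rw [if_neg (by rintro ⟨h, -⟩; exact absurd h (by norm_num)), if_pos (by simp)]
      simp only [zero_add, List.nil_append]
      rw [qzLoop_zmode arr rest 1 [(i, j)] (by omega) hrest]
      simp only [List.forall_mem_cons, hx]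
      split_ifs with h1 h2 <;> (simp_all; try omega)
    · by_cases h1 : x = 1
      · subst h1
        rw [if_pos (by simp)]
        simp only [zero_add, List.nil_append]
        rw [qzLoop_omode arr rest 1 [(i, j)] (by omega) hrest]
        simp only [List.forall_mem_cons, hx]
        split_ifs with ha hb <;> (simp_all; try omega)
      · rw [if_neg (by rintro ⟨h, -⟩; exact h1 h),
          if_neg (by rintro ⟨h, -⟩; exact h0 h)]
        simp only [List.forall_mem_cons, hx]
        rw [if_neg (by rintro ⟨h, -⟩; exact h0 (by injection h)),
          if_neg (by rintro ⟨h, -⟩; exact h1 (by injection h))]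

-- length of the cell list is n^2 (for 0 ≤ n)
theorem qzCells_length (l m n : Int) (hn : 0 ≤ n) :
    ((qzCells l m n).length : Int) = n ^ 2 := by
  simp [qzCells, List.length_flatMap, PySem.List.length_pyRange_one, List.map_const']
  have h : max n 0 = n := by omega
  rw [h]; ring

-- membership in the cell list
theorem qzCells_mem (l m n : Int) (c : Int × Int) :
    c ∈ qzCells l m n ↔
      c.1 ∈ PySem.List.pyRange l (l + n) 1 ∧ c.2 ∈ PySem.List.pyRange m (m + n) 1 := by
  obtain ⟨i, j⟩ := c
  simp [qzCells, List.mem_flatMap]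

-- inside Pre_, every cell of a nonempty block has a valid value
theorem qzPre_isSome (arr : List (List Int)) (l m n : Int) (hn : 0 < n)
    (h : Pre_q_zip arr l m n) :
    ∀ c ∈ qzCells l m n, (qzVal arr c.1 c.2).isSome = true := by
  rcases h with h | ⟨hl, hr, hrow⟩
  · omega
  · intro c hc
    rw [qzCells_mem] at hc
    obtain ⟨hi, hj⟩ := hc
    rw [PySem.List.mem_pyRange_one] at hi hj
    have h1 : (PySem.List.pyGet? arr c.1).isSome = true := by
      rcases Option.eq_none_or_eq_some (PySem.List.pyGet? arr c.1) with he | ⟨row, hrw⟩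
      · rw [PySem.List.pyGet?_eq_none_iff] at he
        simp only [PySem.Raise.InRange] at he
        omega
      · simp [hrw]
    obtain ⟨row, hrw⟩ := Option.isSome_iff_exists.mp h1
    have hb := hrow c.1 (by rw [PySem.List.mem_pyRange_one]; omega)
    rw [hrw] at hb
    simp only [Option.getD_some] at hb
    have h2 : (PySem.List.pyGet? row c.2).isSome = true := by
      rcases Option.eq_none_or_eq_some (PySem.List.pyGet? row c.2) with he | ⟨x, hx⟩
      · rw [PySem.List.pyGet?_eq_none_iff] at he
        simp only [PySem.Raise.InRange] at he
        omega
      · simp [hx]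
    simp [qzVal, hrw, h2]

-- ===== VERDICT (by name: the statement is the Claim_ definition above) =====
theorem q_zip_spec : Claim_equal_q_zip := by
  intro arr l m n _ hPre
  show q_zip arr l m n = q_zip_alt arr l m n
  by_cases hn : n ≤ 0
  · have h1 : PySem.List.pyRange l (l + n) 1 = [] := by
      rw [PySem.List.pyRange_one]
      simp
      omega
    have hcells : qzCells l m n = [] := by simp [qzCells, h1]
    unfold q_zip q_zip_alt
    rw [h1, hcells]
    by_cases h2 : (0 : Int) = n ^ 2 <;> simp [qzOuter, h2]
  · have hn' : 0 < n := by omega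
    have hs := qzPre_isSome arr l m n hn' hPre
    unfold q_zip q_zip_alt
    rw [qzOuter_eq_loop]
    have hflat :
        (PySem.List.pyRange l (l + n) 1).flatMap
          (fun i => (PySem.List.pyRange m (m + n) 1).map (fun j => (i, j))) = qzCells l m n := rfl
    rw [hflat, qzLoop_main arr _ hs]
    have hlen := qzCells_length l m n (by omega)
    have hc0 : ((qzCells l m n).countP (fun c => qzVal arr c.1 c.2 == some 0) =
        (qzCells l m n).length) ↔ ∀ c ∈ qzCells l m n, qzVal arr c.1 c.2 = some 0 := by
      rw [List.countP_eq_length]; simp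
    have hc1 : ((qzCells l m n).countP (fun c => qzVal arr c.1 c.2 == some 1) =
        (qzCells l m n).length) ↔ ∀ c ∈ qzCells l m n, qzVal arr c.1 c.2 = some 1 := by
      rw [List.countP_eq_length]; simp
    have hle0 := List.countP_le_length (l := qzCells l m n)
      (p := fun c => qzVal arr c.1 c.2 == some 0)
    have hle1 := List.countP_le_length (l := qzCells l m n)
      (p := fun c => qzVal arr c.1 c.2 == some 1)
    have hn2 : (0 : Int) < n ^ 2 := by positivity
    by_cases h0 : ∀ c ∈ qzCells l m n, qzVal arr c.1 c.2 = some 0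
    · rw [if_pos h0]
      dsimp only
      rw [if_pos hlen, if_pos (by rw [← hlen, hc0.mpr h0])]
    · rw [if_neg h0]
      have hz : ((qzCells l m n).countP (fun c => qzVal arr c.1 c.2 == some 0) : Int) ≠ n ^ 2 := by
        rw [← hlen]
        have := (not_iff_not.mpr hc0).mpr h0
        omega
      by_cases h1 : ∀ c ∈ qzCells l m n, qzVal arr c.1 c.2 = some 1
      · rw [if_pos h1]
        dsimp only
        rw [if_neg (by omega), if_pos hlen, if_neg hz,
          if_pos (by rw [← hlen, hc1.mpr h1])]
      · rw [if_neg h1]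
        dsimp only
        have ho : ((qzCells l m n).countP (fun c => qzVal arr c.1 c.2 == some 1) : Int) ≠ n ^ 2 := by
          rw [← hlen]
          have := (not_iff_not.mpr hc1).mpr h1
          omega
        rw [if_neg hz, if_neg ho]
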